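-- pv_equiv track=rewrite | github.com/HaislanChagas/Dashboarddiretoria | App.py | detectar_coluna_ancora
-- ===== SOURCE A (Python) =====
-- import unicodedata
--
-- def normalizar_texto(texto) -> str:
--     if texto is None:
--         return ""
--     texto = str(texto).strip().lower()
--     return unicodedata.normalize("NFKD", texto).encode("ascii", "ignore").decode("ascii")
--
-- def detectar_coluna_ancora(valores):
--     max_cols = max(len(l) for l in valores) if valores else 0
--     for c in range(max_cols):
--         amostras = []
--         for r in [0, 1, 2, 5, 6, 7]:
--             if r < len(valores) and c < len(valores[r]):
--                 amostras.append(normalizar_texto(valores[r][c]))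
--         bloco = " | ".join(amostras)
--         if any(chave in bloco for chave in ["mes", "gerente", "funil de vendas", "marco", "março"]):
--             return c
--     return 0
-- ===== SOURCE B (Python) =====
-- import unicodedata
--
--
-- def normalizar_texto(texto) -> str:
--     if texto is None:
--         return ""
--     texto = str(texto).strip().lower()
--     return unicodedata.normalize("NFKD", texto).encode("ascii", "ignore").decode("ascii")
--
--
-- _CHAVES = ["mes", "gerente", "funil de vendas", "marco", "março"]
--
--
-- def detectar_coluna_ancora(valores):
--     # Row-major single pass: collect every column whose sampled cell matches a
--     # keyword, then take the smallest one (0 when nothing matches).  Checking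
--     # each normalized cell on its own is equivalent to A's " | "-joined block
--     # check because no keyword contains '|' or a leading/trailing space.
--     candidatas = set()
--     for r in (0, 1, 2, 5, 6, 7):
--         if r < len(valores):
--             for c, cell in enumerate(valores[r]):
--                 texto = normalizar_texto(cell)
--                 if any(chave in texto for chave in _CHAVES):
--                     candidatas.add(c)
--     return min(candidatas) if candidatas else 0
-- ===== Notes on version B (the rewrite author's own statement) =====
-- stated objective: alternative
-- what changed: Replaced the column-major scan that joins each column's six sample cells into a ' | ' block and early-returns on the first keyword hit by a single row-major pass that tests each sample cell on its own, collects the matching column indices in a set, and returns min(set) (0 when empty); equivalent because no keyword contains '|' or a leading/trailing space.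
import Mathlib
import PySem

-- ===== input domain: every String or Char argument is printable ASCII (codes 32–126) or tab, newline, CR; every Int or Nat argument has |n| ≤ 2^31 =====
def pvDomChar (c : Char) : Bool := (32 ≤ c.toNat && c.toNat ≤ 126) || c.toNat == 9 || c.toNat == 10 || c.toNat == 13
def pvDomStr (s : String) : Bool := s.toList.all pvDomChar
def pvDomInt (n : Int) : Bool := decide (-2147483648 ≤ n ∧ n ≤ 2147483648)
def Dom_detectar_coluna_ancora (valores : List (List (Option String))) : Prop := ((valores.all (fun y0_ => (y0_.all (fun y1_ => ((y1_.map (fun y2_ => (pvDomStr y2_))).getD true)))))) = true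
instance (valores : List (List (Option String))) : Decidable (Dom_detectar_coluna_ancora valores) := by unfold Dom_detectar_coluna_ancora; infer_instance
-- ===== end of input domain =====

-- B replaces A's column-major scan (join each column's sample cells with " | ", test, early return)
-- by one row-major pass that collects the matching column indices in a set and returns its minimum
-- (objective: alternative decomposition; same asymptotic cost).

-- ===== PORT A =====
-- normalizar_texto: on the ASCII input domain NFKD + ascii-encode/decode is the identity,
-- so the port is strip-then-lower (exact there).
def pvNorm (texto : Option String) : String :=
  match texto with
  | none => ""
  | some s => PySem.Str.lower (PySem.Str.strip s)

def pvChaves : List String := ["mes", "gerente", "funil de vendas", "marco", "março"]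

def pvRows : List Nat := [0, 1, 2, 5, 6, 7]

-- inner loop of A: the sample cells of column c, normalized, in row order
def pvAmostras (valores : List (List (Option String))) (c : Nat) : List String :=
  pvRows.foldl (fun acc r =>
    match valores[r]? with
    | some row =>
      match row[c]? with
      | some cell => acc ++ [pvNorm cell]
      | none => acc
    | none => acc) []

-- the 'for c in range(max_cols): … return c' loop with early return
def pvALoop (valores : List (List (Option String))) : List Nat → Int
  | [] => 0
  | c :: cs =>
    let bloco := PySem.Str.join " | " (pvAmostras valores c)
    if pvChaves.any (fun chave => PySem.Str.isIn chave bloco) then (c : Int)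
    else pvALoop valores cs

def detectar_coluna_ancora (valores : List (List (Option String))) : Int :=
  -- max(len(l) for l in valores) if valores else 0 (lengths are ≥ 0, so the running max from 0 is that maximum)
  let maxCols : Nat := if valores = [] then 0 else (valores.map List.length).foldl max 0
  pvALoop valores (List.range maxCols)

-- ===== PORT B =====
def pvCellHit (cell : Option String) : Bool :=
  pvChaves.any (fun chave => PySem.Str.isIn chave (pvNorm cell))

def pvCandidatas (valores : List (List (Option String))) : PySem.Set Int :=
  pvRows.foldl (fun s r =>
    match valores[r]? with
    | some row =>
      (PySem.List.enumerate row 0).foldl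
        (fun s p => if pvCellHit p.2 then PySem.Set.add s p.1 else s) s
    | none => s) PySem.Set.empty

def detectar_coluna_ancora_alt (valores : List (List (Option String))) : Int :=
  match PySem.List.min? (pvCandidatas valores) (fun c => c) with
  | some m => m
  | none => 0

-- ===== PRECONDITION & SPEC =====
def Spec_detectar_coluna_ancora (valores : List (List (Option String))) (out : Int) : Prop := out = detectar_coluna_ancora_alt valores
instance (valores : List (List (Option String))) (out : Int) : Decidable (Spec_detectar_coluna_ancora valores out) := by unfold Spec_detectar_coluna_ancora; infer_instance

-- ===== CLAIM (what is proved, stated in full; the proofs are below) =====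
def Claim_equal_detectar_coluna_ancora : Prop := ∀ (valores : List (List (Option String))), Dom_detectar_coluna_ancora valores → Spec_detectar_coluna_ancora valores (detectar_coluna_ancora valores)

-- ===== LEMMAS AND PROOFS =====

-- column c has a matching sample cell
def pvHit (valores : List (List (Option String))) (c : Nat) : Bool :=
  pvRows.any (fun r =>
    match valores[r]? with
    | some row =>
      match row[c]? with
      | some cell => pvCellHit cell
      | none => false
    | none => false)

-- an infix of an append lies in a side or spans the seam
theorem pv_infix_append_split {α : Type} {k x y : List α} (h : k <:+: x ++ y) :
    k <:+: x ∨ k <:+: y ∨ ∃ k1 k2, k = k1 ++ k2 ∧ k1 ≠ [] ∧ k2 ≠ [] ∧ k1 <:+ x ∧ k2 <+: y := by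
  obtain ⟨s, t, hst⟩ := h
  rw [List.append_assoc] at hst
  rcases List.append_eq_append_iff.mp hst with ⟨as, hx, hkt⟩ | ⟨bs, hs, hy⟩
  · rcases List.append_eq_append_iff.mp hkt with ⟨bs, has, ht⟩ | ⟨cs, hk, hy⟩
    · left; exact ⟨s, bs, by simp [hx, has]⟩
    · rcases eq_or_ne as [] with rfl | has
      · right; left
        exact ⟨[], t, by simp at hk; simp [hk, hy.symm]⟩
      · rcases eq_or_ne cs [] with rfl | hcs
        · left; exact ⟨s, [], by simp [hx, hk]⟩
        · right; right
          exact ⟨as, cs, hk, has, hcs, ⟨s, hx.symm⟩, ⟨t, hy.symm⟩⟩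
  · right; left; exact ⟨bs, t, by simp [hy]⟩

theorem pv_infix_sep {k : List Char} (h : k <:+: [' ', '|', ' ']) (hp : '|' ∉ k) (hne : k ≠ []) :
    k = [' '] := by
  obtain ⟨s, t, hst⟩ := h
  rcases s with _ | ⟨a, _ | ⟨b, _ | ⟨c, s⟩⟩⟩ <;>
    rcases k with _ | ⟨k1, _ | ⟨k2, _ | ⟨k3, _ | ⟨k4, k⟩⟩⟩⟩ <;> simp_all

theorem pv_suffix_sep {k1 : List Char} (h : k1 <:+ [' ', '|', ' ']) (hne : k1 ≠ []) :
    k1 = [' '] ∨ '|' ∈ k1 := by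
  obtain ⟨s, hs⟩ := h
  rcases s with _ | ⟨a, _ | ⟨b, _ | ⟨c, s⟩⟩⟩ <;>
    rcases k1 with _ | ⟨x1, _ | ⟨x2, _ | ⟨x3, _ | ⟨x4, k1⟩⟩⟩⟩ <;> simp_all

-- a keyword without '|' and without a leading/trailing space is an infix of the " | "-joined
-- block iff it is an infix of one of the joined parts
theorem pv_key_infix_join (k : List Char) (hne : k ≠ []) (hp : '|' ∉ k)
    (hh : k.head? ≠ some ' ') (hl : k.getLast? ≠ some ' ') :
    ∀ parts : List (List Char),
      (k <:+: PySem.Chars.join [' ', '|', ' '] parts ↔ ∃ p ∈ parts, k <:+: p)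
  | [] => by simp [PySem.Chars.join_nil, List.infix_nil, hne]
  | [a] => by simp [PySem.Chars.join_singleton]
  | a :: b :: rest => by
    have IH := pv_key_infix_join k hne hp hh hl (b :: rest)
    rw [PySem.Chars.join_cons_cons, List.append_assoc]
    constructor
    · intro h
      rcases pv_infix_append_split h with h | h | ⟨k1, k2, hk, h1, h2, hs1, hp2⟩
      · exact ⟨a, by simp, h⟩
      · rcases pv_infix_append_split h with h | h | ⟨k1, k2, hk, h1, h2, hs1, hp2⟩
        · have := pv_infix_sep h hp hne
          subst this; simp at hh
        · obtain ⟨p, hmem, hinf⟩ := IH.mp h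
          exact ⟨p, List.mem_cons_of_mem a hmem, hinf⟩
        · rcases pv_suffix_sep hs1 h1 with rfl | hmem
          · subst hk; simp at hh
          · exact absurd (by simp [hk, hmem] : '|' ∈ k) hp
      · -- k spans the seam after a: k2 is a nonempty prefix of ' ' :: '|' :: …
        rcases k2 with _ | ⟨c2, _ | ⟨c3, k2'⟩⟩
        · exact absurd rfl h2
        · obtain ⟨u, hu⟩ := hp2
          simp at hu
          subst hk
          rw [hu.1] at hl
          simp at hl
        · obtain ⟨u, hu⟩ := hp2
          simp at hu
          refine absurd (by simp [hk, hu.1, hu.2.1] : '|' ∈ k) hp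
    · rintro ⟨p, hmem, hinf⟩
      rcases List.mem_cons.mp hmem with rfl | hmem
      · exact List.infix_append_of_infix_left hinf
      · exact List.infix_append_of_infix_right (List.infix_append_of_infix_right (IH.mpr ⟨p, hmem, hinf⟩))

-- the inner loop of A builds exactly the filterMap of the sample rows
theorem pv_amostras_eq (valores : List (List (Option String))) (c : Nat) :
    pvAmostras valores c =
      pvRows.filterMap (fun r => ((valores[r]?.bind (fun row => row[c]?)).map pvNorm)) := by
  have aux : ∀ (rs : List Nat) (acc : List String),
      rs.foldl (fun acc r =>
        match valores[r]? with
        | some row =>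
          match row[c]? with
          | some cell => acc ++ [pvNorm cell]
          | none => acc
        | none => acc) acc
      = acc ++ rs.filterMap (fun r => ((valores[r]?.bind (fun row => row[c]?)).map pvNorm)) := by
    intro rs
    induction rs with
    | nil => intro acc; simp
    | cons r rs ih =>
      intro acc
      simp only [List.foldl_cons, List.filterMap_cons]
      cases hv : valores[r]? with
      | none => simp [ih]
      | some row =>
        cases hc : row[c]? with
        | none => simp [ih, hc]
        | some cell => simp [ih, hc]
  exact aux pvRows []

-- A's per-column test agrees with the cell-wise test
theorem pv_block_eq_hit (valores : List (List (Option String))) (c : Nat) :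
    (pvChaves.any (fun chave =>
        PySem.Str.isIn chave (PySem.Str.join " | " (pvAmostras valores c)))) = pvHit valores c := by
  have hsep : (" | " : String).toList = [' ', '|', ' '] := by decide
  rw [Bool.eq_iff_iff]
  simp only [List.any_eq_true, pvHit]
  constructor
  · rintro ⟨chave, hch, hin⟩
    rw [PySem.Str.isIn_iff_infix, PySem.Str.toList_join, hsep] at hin
    have hprops : chave.toList ≠ [] ∧ '|' ∉ chave.toList ∧
        chave.toList.head? ≠ some ' ' ∧ chave.toList.getLast? ≠ some ' ' := by
      simp only [pvChaves, List.mem_cons, List.not_mem_nil, or_false] at hch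
      rcases hch with rfl | rfl | rfl | rfl | rfl <;> decide
    obtain ⟨p, hp, hinf⟩ :=
      (pv_key_infix_join _ hprops.1 hprops.2.1 hprops.2.2.1 hprops.2.2.2 _).mp hin
    rw [List.mem_map] at hp
    obtain ⟨a, ha, rfl⟩ := hp
    rw [pv_amostras_eq, List.mem_filterMap] at ha
    obtain ⟨r, hr, hopt⟩ := ha
    refine ⟨r, hr, ?_⟩
    cases hv : valores[r]? with
    | none => simp [hv] at hopt
    | some row =>
      cases hc : row[c]? with
      | none => simp [hv, hc] at hopt
      | some cell =>
        simp only [hv, hc, Option.bind_some, Option.map_some, Option.some.injEq] at hopt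
        subst hopt
        simp only [hc, pvCellHit, List.any_eq_true]
        exact ⟨chave, hch, (PySem.Str.isIn_iff_infix _ _).mpr hinf⟩
  · rintro ⟨r, hr, hbody⟩
    cases hv : valores[r]? with
    | none => simp [hv] at hbody
    | some row =>
      cases hc : row[c]? with
      | none => simp [hv, hc] at hbody
      | some cell =>
        simp only [hv, hc] at hbody
        simp only [pvCellHit, List.any_eq_true] at hbody
        obtain ⟨chave, hch, hin⟩ := hbody
        refine ⟨chave, hch, ?_⟩
        rw [PySem.Str.isIn_iff_infix, PySem.Str.toList_join, hsep]
        have hprops : chave.toList ≠ [] ∧ '|' ∉ chave.toList ∧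
            chave.toList.head? ≠ some ' ' ∧ chave.toList.getLast? ≠ some ' ' := by
          simp only [pvChaves, List.mem_cons, List.not_mem_nil, or_false] at hch
          rcases hch with rfl | rfl | rfl | rfl | rfl <;> decide
        refine (pv_key_infix_join _ hprops.1 hprops.2.1 hprops.2.2.1 hprops.2.2.2 _).mpr ?_
        refine ⟨(pvNorm cell).toList, ?_, (PySem.Str.isIn_iff_infix _ _).mp hin⟩
        rw [List.mem_map]
        refine ⟨pvNorm cell, ?_, rfl⟩
        rw [pv_amostras_eq, List.mem_filterMap]
        exact ⟨r, hr, by simp [hv, hc]⟩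

theorem pv_aloop_eq (valores : List (List (Option String))) (l : List Nat) :
    pvALoop valores l =
      (match l.find? (fun c => pvHit valores c) with
       | some c => (c : Int)
       | none => 0) := by
  induction l with
  | nil => simp [pvALoop]
  | cons c cs ih =>
    simp only [pvALoop]
    rw [pv_block_eq_hit]
    cases hhit : pvHit valores c with
    | true => simp [hhit]
    | false => simp [hhit, ih]

-- membership through one "if hit then add" fold
theorem pv_mem_foldl_addif {β : Type} (l : List β) (q : β → Bool) (f : β → Int)
    (s : PySem.Set Int) (x : Int) :
    x ∈ l.foldl (fun s b => if q b then PySem.Set.add s (f b) else s) s ↔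
      x ∈ s ∨ ∃ b ∈ l, q b = true ∧ x = f b := by
  induction l generalizing s with
  | nil => simp
  | cons b l ih =>
    simp only [List.foldl_cons]
    cases hq : q b with
    | false => simp [ih, hq]
    | true =>
      rw [ih]
      simp [PySem.Set.mem_add, hq]
      tauto

theorem pv_mem_candidatas (valores : List (List (Option String))) (i : Int) :
    i ∈ pvCandidatas valores ↔ ∃ c : Nat, i = (c : Int) ∧ pvHit valores c = true := by
  have outer : ∀ (rs : List Nat) (s : PySem.Set Int),
      (i ∈ rs.foldl (fun s r =>
          match valores[r]? with
          | some row =>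
            (PySem.List.enumerate row 0).foldl
              (fun s p => if pvCellHit p.2 then PySem.Set.add s p.1 else s) s
          | none => s) s
        ↔ i ∈ s ∨ ∃ r ∈ rs, ∃ row, valores[r]? = some row ∧
            ∃ p ∈ PySem.List.enumerate row 0, pvCellHit p.2 = true ∧ i = p.1) := by
    intro rs
    induction rs with
    | nil => simp
    | cons r rs ih =>
      intro s
      simp only [List.foldl_cons]
      cases hv : valores[r]? with
      | none =>
        rw [ih]
        constructor
        · rintro (h | h)
          · exact Or.inl h
          · right; obtain ⟨r', hr', rest⟩ := h; exact ⟨r', List.mem_cons_of_mem r hr', rest⟩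
        · rintro (h | ⟨r', hr', row, hrow, rest⟩)
          · exact Or.inl h
          · rcases List.mem_cons.mp hr' with rfl | hr'
            · rw [hv] at hrow; cases hrow
            · exact Or.inr ⟨r', hr', row, hrow, rest⟩
      | some row =>
        rw [ih, pv_mem_foldl_addif]
        constructor
        · rintro ((h | ⟨p, hp, hhit, rfl⟩) | ⟨r', hr', row', hrow', rest⟩)
          · exact Or.inl h
          · exact Or.inr ⟨r, List.mem_cons_self .., row, hv, p, hp, hhit, rfl⟩
          · exact Or.inr ⟨r', List.mem_cons_of_mem r hr', row', hrow', rest⟩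
        · rintro (h | ⟨r', hr', row', hrow', p, hp, hhit, hi⟩)
          · exact Or.inl (Or.inl h)
          · rcases List.mem_cons.mp hr' with rfl | hr'
            · rw [hv] at hrow'; cases hrow'
              exact Or.inl (Or.inr ⟨p, hp, hhit, hi⟩)
            · exact Or.inr ⟨r', hr', row', hrow', p, hp, hhit, hi⟩
  rw [pvCandidatas, outer]
  simp only [PySem.Set.empty]
  constructor
  · rintro (h | ⟨r, hr, row, hrow, p, hp, hhit, hi⟩)
    · simp at h
    · obtain ⟨k, hk, rfl⟩ := (PySem.List.mem_enumerate_iff _ _ _).mp hp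
      refine ⟨k, by simpa using hi, ?_⟩
      simp only [pvHit, List.any_eq_true]
      refine ⟨r, hr, ?_⟩
      simp only [hrow, List.getElem?_eq_getElem hk]
      simpa using hhit
  · rintro ⟨c, rfl, hhit⟩
    simp only [pvHit, List.any_eq_true] at hhit
    obtain ⟨r, hr, hbody⟩ := hhit
    cases hv : valores[r]? with
    | none => simp [hv] at hbody
    | some row =>
      cases hc : row[c]? with
      | none => simp [hv, hc] at hbody
      | some cell =>
        simp only [hv, hc] at hbody
        obtain ⟨hlt, hcell⟩ := List.getElem?_eq_some_iff.mp hc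
        right
        refine ⟨r, hr, row, hv, ((0 : Int) + (c : Int), row[c]), ?_, ?_, by simp⟩
        · exact (PySem.List.mem_enumerate_iff _ _ _).mpr ⟨c, hlt, rfl⟩
        · simpa [hcell] using hbody

theorem pv_hit_lt_maxCols (valores : List (List (Option String))) (c : Nat)
    (h : pvHit valores c = true) :
    valores ≠ [] ∧ c < (valores.map List.length).foldl max 0 := by
  simp only [pvHit, List.any_eq_true] at h
  obtain ⟨r, hr, hbody⟩ := h
  cases hv : valores[r]? with
  | none => simp [hv] at hbody
  | some row =>
    cases hc : row[c]? with
    | none => simp [hv, hc] at hbody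
    | some cell =>
      have hmem : row ∈ valores := List.mem_of_getElem? hv
      have hlt : c < row.length := (List.getElem?_eq_some_iff.mp hc).1
      have hle : row.length ≤ (valores.map List.length).foldl max 0 :=
        (PySem.List.le_foldl_max _ _).2 row.length (List.mem_map.mpr ⟨row, hmem, rfl⟩)
      exact ⟨List.ne_nil_of_mem hmem, lt_of_lt_of_le hlt hle⟩

-- ===== VERDICT (by name: the statement is the Claim_ definition above) =====
theorem detectar_coluna_ancora_spec : Claim_equal_detectar_coluna_ancora := by
  intro valores _hdom
  unfold Spec_detectar_coluna_ancora
  simp only [detectar_coluna_ancora, detectar_coluna_ancora_alt]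
  rw [pv_aloop_eq]
  cases hmin : PySem.List.min? (pvCandidatas valores) (fun c => c) with
  | none =>
    have hnil : pvCandidatas valores = [] := (PySem.List.min?_eq_none_iff _ _).mp hmin
    have hnone : ∀ c : Nat, pvHit valores c = false := by
      intro c
      by_contra h
      have hc : pvHit valores c = true := by simpa using h
      have : (c : Int) ∈ pvCandidatas valores := (pv_mem_candidatas _ _).mpr ⟨c, rfl, hc⟩
      rw [hnil] at this
      simp at this
    have hfind : List.find? (fun c => pvHit valores c)
        (List.range (if valores = [] then 0 else (valores.map List.length).foldl max 0)) = none :=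
      List.find?_eq_none.mpr (fun x _ => by simp [hnone])
    simp [hfind]
  | some m =>
    obtain ⟨c0, rfl, hc0⟩ := (pv_mem_candidatas _ _).mp (PySem.List.min?_mem hmin)
    have hminle := PySem.List.min?_isMin hmin
    obtain ⟨hne, hlt⟩ := pv_hit_lt_maxCols valores c0 hc0
    rw [if_neg hne]
    cases hfind : List.find? (fun c => pvHit valores c)
        (List.range ((valores.map List.length).foldl max 0)) with
    | none =>
      exact absurd hc0 (by simpa using List.find?_eq_none.mp hfind c0 (List.mem_range.mpr hlt))
    | some a =>
      obtain ⟨hpa, as, bs, hsplit, hprev⟩ := List.find?_eq_some_iff_append.mp hfind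
      -- a is the least hit: as = range a
      have hlena : a = as.length := by
        have h1 : (List.range ((valores.map List.length).foldl max 0))[as.length]? = some a := by
          rw [hsplit]
          simp
        rw [List.getElem?_eq_some_iff] at h1
        obtain ⟨hl, hv⟩ := h1
        rw [List.getElem_range] at hv
        omega
      have hlow : ∀ y, y < a → pvHit valores y = false := by
        intro y hy
        have hlen' : as.length ≤ (valores.map List.length).foldl max 0 := by
          have := congrArg List.length hsplit
          simp at this
          omega
        have hras : as = List.range a := by
          have h := congrArg (List.take as.length) hsplit
          rw [List.take_left] at h
          rw [List.take_range, min_eq_left hlen'] at h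
          rw [hlena]
          exact h.symm
        have hymem : y ∈ as := by
          rw [hras]
          exact List.mem_range.mpr hy
        simpa using hprev y hymem
      have h1 : (c0 : Int) ≤ (a : Int) := by
        have : (a : Int) ∈ pvCandidatas valores := (pv_mem_candidatas _ _).mpr ⟨a, rfl, hpa⟩
        simpa using hminle _ this
      have h2 : a ≤ c0 := by
        by_contra h
        have := hlow c0 (by omega)
        rw [hc0] at this
        cases this
      have : a = c0 := by omega
      simp [this]
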